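-- pv_equiv track=rewrite | github.com/jjy-cc/study | study_algo/made_humburger.py | solution
-- ===== SOURCE A (Python) =====
-- def solution(ingredient):
--     answer = 0
--     burger = ''
--     pack = '1231'
--
--     for ingre in ingredient:
--         burger += str(ingre)
--
--         if burger[-4:] == pack:
--             answer += 1
--             burger = burger[:-4]
--
--     return answer
-- ===== SOURCE B (Python) =====
-- def _delta(s, ch):
--     # KMP automaton transition for the pattern '1231'.
--     if s == 4:
--         s = 1  # failure link of the full match ('1' is the longest proper border)
--     if ch == '1231'[s]:
--         return s + 1
--     return 1 if ch == '1' else 0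
--
--
-- def solution(ingredient):
--     # KMP automaton over the pattern '1231': keep a stack of automaton states,
--     # one per prefix of the current burger; no characters are stored and the
--     # end-of-burger test is a single O(1) state comparison per ingredient.
--     answer = 0
--     states = [0]
--     for ingre in ingredient:
--         for ch in str(ingre):
--             states.append(_delta(states[-1], ch))
--         if states[-1] == 4:
--             del states[-4:]
--             answer += 1
--     return answer
-- ===== Notes on version B (the rewrite author's own statement) =====
-- stated objective: alternative
-- what changed: B replaces A's string concatenation and suffix-slice comparison by a KMP automaton for the pattern '1231': it keeps a stack of automaton states (one per burger prefix), stores no characters at all, and the end-of-burger test becomes a single state comparison.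
import Mathlib
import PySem

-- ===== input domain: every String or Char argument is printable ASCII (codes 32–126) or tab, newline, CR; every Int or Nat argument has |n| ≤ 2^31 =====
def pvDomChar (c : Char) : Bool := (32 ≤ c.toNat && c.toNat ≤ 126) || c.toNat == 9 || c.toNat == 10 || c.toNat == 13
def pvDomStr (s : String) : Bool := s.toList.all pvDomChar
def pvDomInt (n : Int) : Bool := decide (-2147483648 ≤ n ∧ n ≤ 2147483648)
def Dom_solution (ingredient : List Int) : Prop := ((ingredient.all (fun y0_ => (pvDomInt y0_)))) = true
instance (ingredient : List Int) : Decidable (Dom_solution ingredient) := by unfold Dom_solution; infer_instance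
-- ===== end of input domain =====

-- B replaces A's string concatenation + suffix-slice comparison by a KMP automaton for '1231':
-- a stack of automaton states (one per burger prefix), no characters stored, O(1) end test.

-- ===== PORT A =====
-- A's burger string is ported as List Char (PySem strings are defined over List Char);
-- burger[-4:] and burger[:-4] are PySem.List.slice with bound -4.
def solution (ingredient : List Int) : Int :=
  (ingredient.foldl (fun (st : Int × List Char) ingre =>
      let burger := st.2 ++ PySem.Int.toChars ingre
      if PySem.List.slice burger (some (-4)) none = ['1', '2', '3', '1']
      then (st.1 + 1, PySem.List.slice burger none (some (-4)))
      else (st.1, burger)) (0, [])).1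

-- ===== PORT B =====
-- _delta(s, ch): KMP automaton transition for the pattern '1231'.
-- '1231'[s] is ported as pyGetD on the literal char list: inside solution_alt the state s
-- is always 0..4 (so, after the s==4 normalisation, the index is 0..3 and in range; the
-- default is never read — Python's IndexError is unreachable here).
def pvDelta (s : Int) (ch : Char) : Int :=
  let s' := if s == 4 then 1 else s
  if ch == PySem.List.pyGetD ['1', '2', '3', '1'] s' ' ' then s' + 1
  else if ch == '1' then 1 else 0

-- states[-1] is pyGetD (the list is never empty: it starts as [0] and 'del states[-4:]'
-- fires only when states[-1]==4, which needs at least 4 pushed entries above the base 0);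
-- 'del states[-4:]' is states[:-4], i.e. PySem.List.slice with bound -4.
def solution_alt (ingredient : List Int) : Int :=
  (ingredient.foldl (fun (st : Int × List Int) ingre =>
      let states := (PySem.Int.toChars ingre).foldl
        (fun (sts : List Int) ch => sts ++ [pvDelta (PySem.List.pyGetD sts (-1) 0) ch]) st.2
      if PySem.List.pyGetD states (-1) 0 == 4
      then (st.1 + 1, PySem.List.slice states none (some (-4)))
      else (st.1, states)) (0, [0])).1

-- ===== PRECONDITION & SPEC =====
def Spec_solution (ingredient : List Int) (out : Int) : Prop := out = solution_alt ingredient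
instance (ingredient : List Int) (out : Int) : Decidable (Spec_solution ingredient out) := by unfold Spec_solution; infer_instance

-- ===== CLAIM (what is proved, stated in full; the proofs are below) =====
def Claim_equal_solution : Prop := ∀ (ingredient : List Int), Dom_solution ingredient → Spec_solution ingredient (solution ingredient)

-- ===== LEMMAS AND PROOFS =====

-- φ w = automaton state after reading w (the run of pvDelta over w from 0)
def pvPhi (w : List Char) : Int := w.foldl pvDelta 0

-- the state stack B maintains: the automaton state of every prefix of w (scanl)
def pvSSFrom (a : Int) : List Char → List Int
  | [] => [a]
  | c :: w => a :: pvSSFrom (pvDelta a c) w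

def pvSS (w : List Char) : List Int := pvSSFrom 0 w

lemma pvSSFrom_append_singleton (w : List Char) (a : Int) (c : Char) :
    pvSSFrom a (w ++ [c]) = pvSSFrom a w ++ [List.foldl pvDelta a (w ++ [c])] := by
  induction w generalizing a with
  | nil => simp [pvSSFrom]
  | cons x w ih => simp [pvSSFrom, ih]

lemma pvSS_append_singleton (w : List Char) (c : Char) :
    pvSS (w ++ [c]) = pvSS w ++ [pvPhi (w ++ [c])] := pvSSFrom_append_singleton w 0 c

lemma pvSS_last (w : List Char) : PySem.List.pyGetD (pvSS w) (-1) 0 = pvPhi w := by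
  induction w using List.reverseRecOn with
  | nil => rfl
  | append_singleton w c _ =>
      rw [pvSS_append_singleton]
      exact PySem.List.pyGetD_neg_one_append_singleton _ _ _

lemma pvSS_length (w : List Char) : (pvSS w).length = w.length + 1 := by
  induction w using List.reverseRecOn with
  | nil => rfl
  | append_singleton w c ih => rw [pvSS_append_singleton]; simp [ih]

-- B's inner character loop turns the state stack for w into the one for w ++ cs
lemma pvInner (cs w : List Char) :
    cs.foldl (fun (sts : List Int) ch => sts ++ [pvDelta (PySem.List.pyGetD sts (-1) 0) ch])
      (pvSS w) = pvSS (w ++ cs) := by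
  induction cs generalizing w with
  | nil => simp
  | cons c cs ih =>
      have : pvSS w ++ [pvDelta (PySem.List.pyGetD (pvSS w) (-1) 0) c] = pvSS (w ++ [c]) := by
        rw [pvSS_last, pvSS_append_singleton]
        simp [pvPhi, List.foldl_append]
      simp only [List.foldl_cons, this, ih (w ++ [c])]
      simp

lemma pvDelta_bound (s : Int) (c : Char) (h0 : 0 ≤ s) (h4 : s ≤ 4) :
    0 ≤ pvDelta s c ∧ pvDelta s c ≤ 4 := by
  unfold pvDelta
  split_ifs <;> simp_all <;> omega

lemma pvPhi_bound (w : List Char) : 0 ≤ pvPhi w ∧ pvPhi w ≤ 4 := by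
  suffices h : ∀ (w : List Char) (a : Int), 0 ≤ a → a ≤ 4 →
      0 ≤ List.foldl pvDelta a w ∧ List.foldl pvDelta a w ≤ 4 by
    exact h w 0 (by norm_num) (by norm_num)
  intro w
  induction w with
  | nil => intro a h0 h4; exact ⟨h0, h4⟩
  | cons c w ih =>
      intro a h0 h4
      obtain ⟨b0, b4⟩ := pvDelta_bound a c h0 h4
      exact ih _ b0 b4

-- state k means: the first k pattern characters are a suffix of w
lemma pvSuffixExt (p w : List Char) (c : Char) (h : p <:+ w) : (p ++ [c]) <:+ (w ++ [c]) := by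
  obtain ⟨t, rfl⟩ := h; exact ⟨t, by simp⟩

lemma pvDelta0 (c : Char) : pvDelta 0 c = if c = '1' then 1 else 0 := by
  simp [pvDelta, PySem.List.pyGetD, PySem.List.pyGet?, PySem.List.pyIdx?]
lemma pvDelta1 (c : Char) : pvDelta 1 c = if c = '2' then 2 else if c = '1' then 1 else 0 := by
  simp [pvDelta, PySem.List.pyGetD, PySem.List.pyGet?, PySem.List.pyIdx?]
lemma pvDelta2 (c : Char) : pvDelta 2 c = if c = '3' then 3 else if c = '1' then 1 else 0 := by
  simp [pvDelta, PySem.List.pyGetD, PySem.List.pyGet?, PySem.List.pyIdx?]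
lemma pvDelta3 (c : Char) : pvDelta 3 c = if c = '1' then 4 else 0 := by
  by_cases h : c = '1' <;> simp [pvDelta, PySem.List.pyGetD, PySem.List.pyGet?, PySem.List.pyIdx?, h]
lemma pvDelta4 (c : Char) : pvDelta 4 c = if c = '2' then 2 else if c = '1' then 1 else 0 := by
  simp [pvDelta, PySem.List.pyGetD, PySem.List.pyGet?, PySem.List.pyIdx?]

-- state k means: the first k pattern characters are a suffix of w
lemma pvPhi_suffix (w : List Char) :
    (pvPhi w = 1 → ['1'] <:+ w) ∧ (pvPhi w = 2 → ['1', '2'] <:+ w) ∧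
    (pvPhi w = 3 → ['1', '2', '3'] <:+ w) ∧ (pvPhi w = 4 → ['1', '2', '3', '1'] <:+ w) := by
  induction w using List.reverseRecOn with
  | nil => simp [pvPhi]
  | append_singleton w c ih =>
      obtain ⟨ih1, ih2, ih3, ih4⟩ := ih
      have hstep : pvPhi (w ++ [c]) = pvDelta (pvPhi w) c := by
        simp [pvPhi, List.foldl_append]
      obtain ⟨hb0, hb4⟩ := pvPhi_bound w
      rw [hstep]
      interval_cases h : pvPhi w
      · rw [pvDelta0]
        by_cases hc : c = '1' <;> simp [hc]
      · have s1 := ih1 rfl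
        rw [pvDelta1]
        by_cases hc2 : c = '2'
        · simp [hc2]
          exact pvSuffixExt _ _ _ s1
        · by_cases hc1 : c = '1' <;> simp [hc1, hc2]
      · have s2 := ih2 rfl
        rw [pvDelta2]
        by_cases hc3 : c = '3'
        · simp [hc3]
          exact pvSuffixExt _ _ _ s2
        · by_cases hc1 : c = '1' <;> simp [hc1, hc3]
      · have s3 := ih3 rfl
        rw [pvDelta3]
        by_cases hc1 : c = '1' <;> simp [hc1]
        exact pvSuffixExt _ _ _ s3
      · have s4 := ih4 rfl
        have s1 : ['1'] <:+ w := List.IsSuffix.trans ⟨['1', '2', '3'], rfl⟩ s4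
        rw [pvDelta4]
        by_cases hc2 : c = '2'
        · simp [hc2]
          exact pvSuffixExt _ _ _ s1
        · by_cases hc1 : c = '1' <;> simp [hc1, hc2]

lemma pvPhi_pack (t : List Char) : pvPhi (t ++ ['1', '2', '3', '1']) = 4 := by
  have hstep : pvPhi (t ++ ['1', '2', '3', '1'])
      = List.foldl pvDelta (pvPhi t) ['1', '2', '3', '1'] := by
    simp [pvPhi, List.foldl_append]
  obtain ⟨hb0, hb4⟩ := pvPhi_bound t
  rw [hstep]
  interval_cases h : pvPhi t <;> decide

-- A's pop (burger[:-4]) corresponds on the state stack to B's pop (states[:-4])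
lemma pvSS_pop (t : List Char) (a b c d : Char) :
    PySem.List.slice (pvSS (t ++ [a, b, c, d])) none (some (-4)) = pvSS t := by
  have e : t ++ [a, b, c, d] = ((t ++ [a]) ++ [b] ++ [c]) ++ [d] := by simp
  rw [e, pvSS_append_singleton, pvSS_append_singleton, pvSS_append_singleton,
    pvSS_append_singleton]
  rw [PySem.List.slice_to_neg_ofNat _ 4 (by omega)]
  simp [pvSS_length]

-- the end-of-burger tests agree: last state 4 ⟺ the last four characters are '1231'
lemma pvCond (w : List Char) :
    (PySem.List.slice w (some (-4)) none = ['1', '2', '3', '1']) ↔ pvPhi w = 4 := by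
  rw [PySem.List.slice_from_neg_ofNat _ 4 (by omega)]
  constructor
  · intro h
    have hlen : 4 ≤ w.length := by
      by_contra hn
      have : w.length - 4 = 0 := by omega
      rw [this, List.drop_zero] at h
      have := congrArg List.length h
      simp at this; omega
    have : w = w.take (w.length - 4) ++ ['1', '2', '3', '1'] := by
      conv_lhs => rw [← List.take_append_drop (w.length - 4) w]
      rw [h]
    rw [this]
    exact pvPhi_pack _
  · intro h
    obtain ⟨t, rfl⟩ := (pvPhi_suffix w).2.2.2 h
    have : (t ++ ['1', '2', '3', '1']).length - 4 = t.length := by simp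
    rw [this, List.drop_left]

-- main loop invariant: B's state stack is pvSS of A's burger
lemma pv_main (l : List Int) : ∀ (ans : Int) (w : List Char),
    (l.foldl (fun (st : Int × List Char) ingre =>
        let burger := st.2 ++ PySem.Int.toChars ingre
        if PySem.List.slice burger (some (-4)) none = ['1', '2', '3', '1']
        then (st.1 + 1, PySem.List.slice burger none (some (-4)))
        else (st.1, burger)) (ans, w)).1
    = (l.foldl (fun (st : Int × List Int) ingre =>
        let states := (PySem.Int.toChars ingre).foldl
          (fun (sts : List Int) ch => sts ++ [pvDelta (PySem.List.pyGetD sts (-1) 0) ch]) st.2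
        if PySem.List.pyGetD states (-1) 0 == 4
        then (st.1 + 1, PySem.List.slice states none (some (-4)))
        else (st.1, states)) (ans, (pvSS w))).1 := by
  induction l with
  | nil => intro ans w; rfl
  | cons i l ih =>
      intro ans w
      simp only [List.foldl_cons]
      have hstates : (PySem.Int.toChars i).foldl
          (fun (sts : List Int) ch => sts ++ [pvDelta (PySem.List.pyGetD sts (-1) 0) ch])
          (pvSS w) = pvSS (w ++ PySem.Int.toChars i) := pvInner _ w
      set burger := w ++ PySem.Int.toChars i with hb
      by_cases h : PySem.List.slice burger (some (-4)) none = ['1', '2', '3', '1']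
      · have h4 : pvPhi burger = 4 := (pvCond burger).mp h
        have hBcond : (PySem.List.pyGetD (pvSS burger) (-1) 0 == 4) = true := by
          rw [pvSS_last, h4]; decide
        obtain ⟨t, ht⟩ := (pvPhi_suffix burger).2.2.2 h4
        have hA : PySem.List.slice burger none (some (-4)) = t := by
          rw [← ht, PySem.List.slice_to_neg_ofNat _ 4 (by omega)]
          simp
        have hB : PySem.List.slice (pvSS burger) none (some (-4)) = pvSS t := by
          rw [← ht]; exact pvSS_pop t _ _ _ _
        simp only [hstates, hBcond, if_pos h, if_true, hA, hB]
        exact ih (ans + 1) t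
      · have h4 : pvPhi burger ≠ 4 := fun hc => h ((pvCond burger).mpr hc)
        have hBcond : (PySem.List.pyGetD (pvSS burger) (-1) 0 == 4) = false := by
          rw [pvSS_last]; simpa using h4
        simp only [hstates, hBcond, if_neg h, Bool.false_eq_true, if_false]
        exact ih ans burger

-- ===== VERDICT (by name: the statement is the Claim_ definition above) =====
theorem solution_spec : Claim_equal_solution := by
  intro ingredient _
  unfold Spec_solution solution solution_alt
  exact pv_main ingredient 0 []
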